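-- pv_equiv track=rewrite | github.com/TabareMajem/momentAIc | momentaic-backend/app/agents/lead_scraper_agent.py | _parse_linkedin_leads
-- ===== SOURCE A (Python) =====
-- from typing import Dict, Any, List, Optional
--
-- def _parse_linkedin_leads(response: str) -> List[Dict[str, str]]:
--     """Parse LinkedIn leads from LLM response"""
--     leads = []
--     current_lead = {}
--
--     for line in response.split("\n"):
--         line = line.strip()
--         if line.startswith("NAME:"):
--             if current_lead:
--                 leads.append(current_lead)
--             current_lead = {"name": line.replace("NAME:", "").strip()}
--         elif line.startswith("TITLE:"):
--             current_lead["title"] = line.replace("TITLE:", "").strip()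
--         elif line.startswith("COMPANY:"):
--             current_lead["company"] = line.replace("COMPANY:", "").strip()
--         elif line.startswith("LINKEDIN:"):
--             current_lead["linkedin_url"] = line.replace("LINKEDIN:", "").strip()
--         elif line.startswith("LOCATION:"):
--             current_lead["location"] = line.replace("LOCATION:", "").strip()
--         elif line == "---" and current_lead:
--             leads.append(current_lead)
--             current_lead = {}
--
--     if current_lead:
--         leads.append(current_lead)
--
--     return leads
-- ===== SOURCE B (Python) =====
-- from typing import Dict, List
--
-- _PREFIXES = [("NAME:", "name"), ("TITLE:", "title"), ("COMPANY:", "company"),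
--              ("LINKEDIN:", "linkedin_url"), ("LOCATION:", "location")]
--
-- def _parse_linkedin_leads(response: str) -> List[Dict[str, str]]:
--     """Two-pass: segment stripped lines into record groups, then convert each group to a dict."""
--     # Pass 1: group the recognized lines; NAME: or a bare '---' flushes the current group.
--     groups: List[List[str]] = []
--     current: List[str] = []
--     for raw in response.split("\n"):
--         line = raw.strip()
--         if line.startswith("NAME:"):
--             if current:
--                 groups.append(current)
--             current = [line]
--         elif any(line.startswith(p) for p, _ in _PREFIXES[1:]):
--             current.append(line)
--         elif line == "---" and current:
--             groups.append(current)
--             current = []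
--     if current:
--         groups.append(current)
--     # Pass 2: each group becomes a dict keyed by the matching prefix.
--     result = []
--     for group in groups:
--         lead: Dict[str, str] = {}
--         for line in group:
--             for prefix, key in _PREFIXES:
--                 if line.startswith(prefix):
--                     lead[key] = line.replace(prefix, "").strip()
--                     break
--         result.append(lead)
--     return result
-- ===== Notes on version B (the rewrite author's own statement) =====
-- stated objective: alternative
-- what changed: Replaces A's single stateful loop of five if/elif dict-update branches with a two-pass design: a first pass segments the stripped lines into record groups (NAME: or a bare '---' flushes the group), and a second table-driven pass converts each group to a dict by matching the line's prefix in a prefix->key table.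
import Mathlib
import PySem

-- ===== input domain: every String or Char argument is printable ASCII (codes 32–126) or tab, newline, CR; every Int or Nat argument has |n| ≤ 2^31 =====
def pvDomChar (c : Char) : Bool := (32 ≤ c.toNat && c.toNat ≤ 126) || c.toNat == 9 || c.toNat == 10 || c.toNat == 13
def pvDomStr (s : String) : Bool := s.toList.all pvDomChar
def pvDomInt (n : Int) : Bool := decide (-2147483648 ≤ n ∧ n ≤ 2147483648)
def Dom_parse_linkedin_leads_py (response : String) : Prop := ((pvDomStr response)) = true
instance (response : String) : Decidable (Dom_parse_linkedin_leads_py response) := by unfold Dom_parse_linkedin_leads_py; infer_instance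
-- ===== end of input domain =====

-- B replaces A's single stateful five-branch loop by a two-pass decomposition (group the lines
-- into records, then convert each group with a prefix->key table); same cost, alternative structure.

-- ===== PORT A =====
def pvStepA (st : List (PySem.Dict String String) × PySem.Dict String String) (raw : List Char) :
    List (PySem.Dict String String) × PySem.Dict String String :=
  let line := PySem.Chars.strip raw
  if PySem.Chars.startswith line "NAME:".toList then
    ((if st.2.items ≠ [] then st.1 ++ [st.2] else st.1),
     PySem.Dict.empty.insert "name" (String.ofList (PySem.Chars.strip (PySem.Chars.replace line "NAME:".toList []))))
  else if PySem.Chars.startswith line "TITLE:".toList then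
    (st.1, st.2.insert "title" (String.ofList (PySem.Chars.strip (PySem.Chars.replace line "TITLE:".toList []))))
  else if PySem.Chars.startswith line "COMPANY:".toList then
    (st.1, st.2.insert "company" (String.ofList (PySem.Chars.strip (PySem.Chars.replace line "COMPANY:".toList []))))
  else if PySem.Chars.startswith line "LINKEDIN:".toList then
    (st.1, st.2.insert "linkedin_url" (String.ofList (PySem.Chars.strip (PySem.Chars.replace line "LINKEDIN:".toList []))))
  else if PySem.Chars.startswith line "LOCATION:".toList then
    (st.1, st.2.insert "location" (String.ofList (PySem.Chars.strip (PySem.Chars.replace line "LOCATION:".toList []))))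
  else if line = "---".toList ∧ st.2.items ≠ [] then
    (st.1 ++ [st.2], PySem.Dict.empty)
  else st

def parse_linkedin_leads_py (response : String) : List (List (String × String)) :=
  let st := (PySem.Chars.splitOn response.toList "\n".toList).foldl pvStepA ([], PySem.Dict.empty)
  let leads := if st.2.items ≠ [] then st.1 ++ [st.2] else st.1
  leads.map PySem.Dict.items

-- ===== PORT B =====
def pvPrefixes : List (List Char × String) :=
  [("NAME:".toList, "name"), ("TITLE:".toList, "title"), ("COMPANY:".toList, "company"),
   ("LINKEDIN:".toList, "linkedin_url"), ("LOCATION:".toList, "location")]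

-- pass 1: segment the stripped lines into record groups
def pvStepB (st : List (List (List Char)) × List (List Char)) (raw : List Char) :
    List (List (List Char)) × List (List Char) :=
  let line := PySem.Chars.strip raw
  if PySem.Chars.startswith line "NAME:".toList then
    ((if st.2 ≠ [] then st.1 ++ [st.2] else st.1), [line])
  else if (pvPrefixes.drop 1).any (fun p => PySem.Chars.startswith line p.1) then
    (st.1, st.2 ++ [line])
  else if line = "---".toList ∧ st.2 ≠ [] then
    (st.1 ++ [st.2], [])
  else st

-- pass 2: convert one group to a dict via the prefix table (first matching prefix = Source B's break)
def pvConvStep (d : PySem.Dict String String) (line : List Char) : PySem.Dict String String :=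
  match pvPrefixes.find? (fun p => PySem.Chars.startswith line p.1) with
  | some (pre, key) => d.insert key (String.ofList (PySem.Chars.strip (PySem.Chars.replace line pre [])))
  | none => d

def pvConv (g : List (List Char)) : PySem.Dict String String :=
  g.foldl pvConvStep PySem.Dict.empty

def parse_linkedin_leads_py_alt (response : String) : List (List (String × String)) :=
  let st := (PySem.Chars.splitOn response.toList "\n".toList).foldl pvStepB ([], [])
  let groups := if st.2 ≠ [] then st.1 ++ [st.2] else st.1
  groups.foldl (fun acc g => acc ++ [(pvConv g).items]) []

-- ===== PRECONDITION & SPEC =====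
def Spec_parse_linkedin_leads_py (response : String) (out : List (List (String × String))) : Prop := out = parse_linkedin_leads_py_alt response
instance (response : String) (out : List (List (String × String))) : Decidable (Spec_parse_linkedin_leads_py response out) := by unfold Spec_parse_linkedin_leads_py; infer_instance

-- ===== CLAIM (what is proved, stated in full; the proofs are below) =====
def Claim_equal_parse_linkedin_leads_py : Prop := ∀ (response : String), Dom_parse_linkedin_leads_py response → Spec_parse_linkedin_leads_py response (parse_linkedin_leads_py response)

-- ===== LEMMAS AND PROOFS =====

lemma pv_insert_items_ne_nil (d : PySem.Dict String String) (k v : String) :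
    (d.insert k v).items ≠ [] := by
  rcases h : d.contains k with _ | _
  · simp [PySem.Dict.items_insert_of_not_contains d v h]
  · have hk : k ∈ d.keys := (PySem.Dict.contains_iff_mem_keys d k).mp h
    have hne : d.items ≠ [] := by
      intro hnil
      simp [PySem.Dict.keys, hnil] at hk
    simp [PySem.Dict.items_insert_of_contains d v h, hne]

lemma pvConv_append (g : List (List Char)) (l : List Char) :
    pvConv (g ++ [l]) = pvConvStep (pvConv g) l := by
  simp [pvConv, List.foldl_append]


-- find? over the prefix table under the startswith facts
lemma pvFind_name (line : List Char) (hN : PySem.Chars.startswith line "NAME:".toList = true) :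
    pvPrefixes.find? (fun p => PySem.Chars.startswith line p.1) = some ("NAME:".toList, "name") := by
  unfold pvPrefixes
  exact List.find?_cons_of_pos (p := fun (q : List Char × String) => PySem.Chars.startswith line q.1) hN

lemma pvFind_title (line : List Char)
    (hN : PySem.Chars.startswith line "NAME:".toList = false)
    (hT : PySem.Chars.startswith line "TITLE:".toList = true) :
    pvPrefixes.find? (fun p => PySem.Chars.startswith line p.1) = some ("TITLE:".toList, "title") := by
  unfold pvPrefixes
  rw [List.find?_cons_of_neg (p := fun (q : List Char × String) => PySem.Chars.startswith line q.1) (by simp only [Bool.not_eq_true]; exact hN), List.find?_cons_of_pos (p := fun (q : List Char × String) => PySem.Chars.startswith line q.1) hT]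

lemma pvFind_company (line : List Char)
    (hN : PySem.Chars.startswith line "NAME:".toList = false)
    (hT : PySem.Chars.startswith line "TITLE:".toList = false)
    (hC : PySem.Chars.startswith line "COMPANY:".toList = true) :
    pvPrefixes.find? (fun p => PySem.Chars.startswith line p.1) = some ("COMPANY:".toList, "company") := by
  unfold pvPrefixes
  rw [List.find?_cons_of_neg (p := fun (q : List Char × String) => PySem.Chars.startswith line q.1) (by simp only [Bool.not_eq_true]; exact hN), List.find?_cons_of_neg (p := fun (q : List Char × String) => PySem.Chars.startswith line q.1) (by simp only [Bool.not_eq_true]; exact hT),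
      List.find?_cons_of_pos (p := fun (q : List Char × String) => PySem.Chars.startswith line q.1) hC]

lemma pvFind_linkedin (line : List Char)
    (hN : PySem.Chars.startswith line "NAME:".toList = false)
    (hT : PySem.Chars.startswith line "TITLE:".toList = false)
    (hC : PySem.Chars.startswith line "COMPANY:".toList = false)
    (hL : PySem.Chars.startswith line "LINKEDIN:".toList = true) :
    pvPrefixes.find? (fun p => PySem.Chars.startswith line p.1) = some ("LINKEDIN:".toList, "linkedin_url") := by
  unfold pvPrefixes
  rw [List.find?_cons_of_neg (p := fun (q : List Char × String) => PySem.Chars.startswith line q.1) (by simp only [Bool.not_eq_true]; exact hN), List.find?_cons_of_neg (p := fun (q : List Char × String) => PySem.Chars.startswith line q.1) (by simp only [Bool.not_eq_true]; exact hT),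
      List.find?_cons_of_neg (p := fun (q : List Char × String) => PySem.Chars.startswith line q.1) (by simp only [Bool.not_eq_true]; exact hC), List.find?_cons_of_pos (p := fun (q : List Char × String) => PySem.Chars.startswith line q.1) hL]

lemma pvFind_location (line : List Char)
    (hN : PySem.Chars.startswith line "NAME:".toList = false)
    (hT : PySem.Chars.startswith line "TITLE:".toList = false)
    (hC : PySem.Chars.startswith line "COMPANY:".toList = false)
    (hL : PySem.Chars.startswith line "LINKEDIN:".toList = false)
    (hO : PySem.Chars.startswith line "LOCATION:".toList = true) :
    pvPrefixes.find? (fun p => PySem.Chars.startswith line p.1) = some ("LOCATION:".toList, "location") := by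
  unfold pvPrefixes
  rw [List.find?_cons_of_neg (p := fun (q : List Char × String) => PySem.Chars.startswith line q.1) (by simp only [Bool.not_eq_true]; exact hN), List.find?_cons_of_neg (p := fun (q : List Char × String) => PySem.Chars.startswith line q.1) (by simp only [Bool.not_eq_true]; exact hT),
      List.find?_cons_of_neg (p := fun (q : List Char × String) => PySem.Chars.startswith line q.1) (by simp only [Bool.not_eq_true]; exact hC), List.find?_cons_of_neg (p := fun (q : List Char × String) => PySem.Chars.startswith line q.1) (by simp only [Bool.not_eq_true]; exact hL),
      List.find?_cons_of_pos (p := fun (q : List Char × String) => PySem.Chars.startswith line q.1) hO]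

-- (drop 1).any under the startswith facts
lemma pvAny_false (line : List Char)
    (hT : PySem.Chars.startswith line "TITLE:".toList = false)
    (hC : PySem.Chars.startswith line "COMPANY:".toList = false)
    (hL : PySem.Chars.startswith line "LINKEDIN:".toList = false)
    (hO : PySem.Chars.startswith line "LOCATION:".toList = false) :
    (pvPrefixes.drop 1).any (fun p => PySem.Chars.startswith line p.1) = false := by
  unfold pvPrefixes
  simp only [List.drop, List.any_cons, List.any_nil]
  rw [hT, hC, hL, hO]
  rfl

-- the state relation preserved by one line
lemma pvStep_rel (st1 : List (PySem.Dict String String) × PySem.Dict String String)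
    (st2 : List (List (List Char)) × List (List Char)) (raw : List Char)
    (h1 : st1.1 = st2.1.map pvConv) (h2 : st1.2 = pvConv st2.2)
    (h3 : st1.2.items = [] ↔ st2.2 = []) :
    (pvStepA st1 raw).1 = (pvStepB st2 raw).1.map pvConv ∧
    (pvStepA st1 raw).2 = pvConv (pvStepB st2 raw).2 ∧
    ((pvStepA st1 raw).2.items = [] ↔ (pvStepB st2 raw).2 = []) := by
  simp only [pvStepA, pvStepB]
  rcases hN : PySem.Chars.startswith (PySem.Chars.strip raw) "NAME:".toList with _ | _
  case true =>
    simp only [if_true]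
    refine ⟨?_, ?_, ?_⟩
    · by_cases hc : st2.2 = []
      · have h0 : st1.2.items = [] := h3.mpr hc
        rw [if_neg (show ¬st1.2.items ≠ [] from by simp [h0]),
            if_neg (show ¬st2.2 ≠ [] from by simp [hc]), h1]
      · have h0 : st1.2.items ≠ [] := fun h => hc (h3.mp h)
        rw [if_pos h0, if_pos hc, h1, h2]
        simp
    · rw [show pvConv [PySem.Chars.strip raw] = pvConvStep PySem.Dict.empty (PySem.Chars.strip raw) from rfl]
      unfold pvConvStep
      rw [pvFind_name _ hN]
    · exact iff_of_false (pv_insert_items_ne_nil _ _ _) (by simp)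
  case false =>
    simp only [Bool.false_eq_true, if_false]
    rcases hT : PySem.Chars.startswith (PySem.Chars.strip raw) "TITLE:".toList with _ | _
    case true =>
      have hany : (pvPrefixes.drop 1).any (fun p => PySem.Chars.startswith (PySem.Chars.strip raw) p.1) = true :=
        List.any_eq_true.mpr ⟨("TITLE:".toList, "title"), by unfold pvPrefixes; simp, hT⟩
      simp only [if_true]; rw [if_pos hany]
      refine ⟨h1, ?_, ?_⟩
      · rw [pvConv_append, ← h2]
        unfold pvConvStep
        rw [pvFind_title _ hN hT]
      · exact iff_of_false (pv_insert_items_ne_nil _ _ _) (by simp)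
    case false =>
      simp only [Bool.false_eq_true, if_false]
      rcases hC : PySem.Chars.startswith (PySem.Chars.strip raw) "COMPANY:".toList with _ | _
      case true =>
        have hany : (pvPrefixes.drop 1).any (fun p => PySem.Chars.startswith (PySem.Chars.strip raw) p.1) = true :=
          List.any_eq_true.mpr ⟨("COMPANY:".toList, "company"), by unfold pvPrefixes; simp, hC⟩
        simp only [if_true]; rw [if_pos hany]
        refine ⟨h1, ?_, ?_⟩
        · rw [pvConv_append, ← h2]
          unfold pvConvStep
          rw [pvFind_company _ hN hT hC]
        · exact iff_of_false (pv_insert_items_ne_nil _ _ _) (by simp)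
      case false =>
        simp only [Bool.false_eq_true, if_false]
        rcases hL : PySem.Chars.startswith (PySem.Chars.strip raw) "LINKEDIN:".toList with _ | _
        case true =>
          have hany : (pvPrefixes.drop 1).any (fun p => PySem.Chars.startswith (PySem.Chars.strip raw) p.1) = true :=
            List.any_eq_true.mpr ⟨("LINKEDIN:".toList, "linkedin_url"), by unfold pvPrefixes; simp, hL⟩
          simp only [if_true]; rw [if_pos hany]
          refine ⟨h1, ?_, ?_⟩
          · rw [pvConv_append, ← h2]
            unfold pvConvStep
            rw [pvFind_linkedin _ hN hT hC hL]
          · exact iff_of_false (pv_insert_items_ne_nil _ _ _) (by simp)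
        case false =>
          simp only [Bool.false_eq_true, if_false]
          rcases hO : PySem.Chars.startswith (PySem.Chars.strip raw) "LOCATION:".toList with _ | _
          case true =>
            have hany : (pvPrefixes.drop 1).any (fun p => PySem.Chars.startswith (PySem.Chars.strip raw) p.1) = true :=
              List.any_eq_true.mpr ⟨("LOCATION:".toList, "location"), by unfold pvPrefixes; simp, hO⟩
            simp only [if_true]; rw [if_pos hany]
            refine ⟨h1, ?_, ?_⟩
            · rw [pvConv_append, ← h2]
              unfold pvConvStep
              rw [pvFind_location _ hN hT hC hL hO]
            · exact iff_of_false (pv_insert_items_ne_nil _ _ _) (by simp)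
          case false =>
            simp only [Bool.false_eq_true, if_false]
            rw [if_neg (show ¬((pvPrefixes.drop 1).any (fun p => PySem.Chars.startswith (PySem.Chars.strip raw) p.1) = true) from by rw [pvAny_false _ hT hC hL hO]; simp)]
            by_cases hd : PySem.Chars.strip raw = "---".toList ∧ st1.2.items ≠ []
            · obtain ⟨hd1, hd2⟩ := hd
              have hd2' : st2.2 ≠ [] := fun h => hd2 (h3.mpr h)
              rw [if_pos ⟨hd1, hd2⟩, if_pos ⟨hd1, hd2'⟩]
              exact ⟨by rw [h1, h2]; simp, Eq.refl (pvConv []), iff_of_true rfl rfl⟩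
            · have hd' : ¬ (PySem.Chars.strip raw = "---".toList ∧ st2.2 ≠ []) := by
                intro h
                exact hd ⟨h.1, fun hh => h.2 (h3.mp hh)⟩
              rw [if_neg hd, if_neg hd']
              exact ⟨h1, h2, h3⟩

lemma pvFold_rel (L : List (List Char))
    (st1 : List (PySem.Dict String String) × PySem.Dict String String)
    (st2 : List (List (List Char)) × List (List Char))
    (h1 : st1.1 = st2.1.map pvConv) (h2 : st1.2 = pvConv st2.2)
    (h3 : st1.2.items = [] ↔ st2.2 = []) :
    (L.foldl pvStepA st1).1 = (L.foldl pvStepB st2).1.map pvConv ∧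
    (L.foldl pvStepA st1).2 = pvConv (L.foldl pvStepB st2).2 ∧
    ((L.foldl pvStepA st1).2.items = [] ↔ (L.foldl pvStepB st2).2 = []) := by
  induction L generalizing st1 st2 with
  | nil => exact ⟨h1, h2, h3⟩
  | cons x xs ih =>
    obtain ⟨g1, g2, g3⟩ := pvStep_rel st1 st2 x h1 h2 h3
    exact ih _ _ g1 g2 g3

-- ===== VERDICT (by name: the statement is the Claim_ definition above) =====
theorem parse_linkedin_leads_py_spec : Claim_equal_parse_linkedin_leads_py := by
  intro response _
  unfold Spec_parse_linkedin_leads_py parse_linkedin_leads_py parse_linkedin_leads_py_alt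
  obtain ⟨h1, h2, h3⟩ := pvFold_rel (PySem.Chars.splitOn response.toList "\n".toList)
    ([], PySem.Dict.empty) ([], []) rfl rfl (iff_of_true rfl rfl)
  rw [PySem.List.foldl_append_singleton_eq_map]
  dsimp only
  simp only [List.nil_append]
  by_cases hc : ((PySem.Chars.splitOn response.toList "\n".toList).foldl pvStepB ([], [])).2 = []
  · have h0 := h3.mpr hc
    rw [if_neg (not_not_intro h0), if_neg (not_not_intro hc), h1, List.map_map]
    rfl
  · have h0 : ((PySem.Chars.splitOn response.toList "\n".toList).foldl pvStepA ([], PySem.Dict.empty)).2.items ≠ [] :=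
      fun h => hc (h3.mp h)
    rw [if_pos h0, if_pos hc, h1, h2, List.map_append, List.map_append, List.map_map]
    rfl
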